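-- pv_equiv track=rewrite | github.com/rzzzwilson/Random-Stuff | reddit_replies/list_sub_second/test2.py | substr_split
-- ===== SOURCE A (Python) =====
-- def index_second_str(l, start):
--     """Return index of second occurrence of l[start].
--
--     Returns 0 if there was no second occurrence.
--     """
--
--     try:
--         index = l.index(l[start], start+1)
--     except ValueError:
--         index = 0
--     return index
--
-- def substr_split(l):
--     """Given a list of strings 'l', return list of sublists starting with l[0]."""
--
--     result = []
--     start = 0
--     while start < len(l):
--         index = index_second_str(l, start)
--         if index:   # is index > 0?
--             sub = l[start:index]
--             start = index
--         else:
--             sub = l[start:]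
--             index = len(l)
--         result.append(sub)
--         start = index
--     return result
-- ===== SOURCE B (Python) =====
-- def substr_split(l):
--     """Given a list of strings 'l', return list of sublists starting with l[0]."""
--     result = []
--     cur = []
--     for x in l:
--         if cur and x == cur[0]:
--             result.append(cur)
--             cur = [x]
--         else:
--             cur.append(x)
--     if cur:
--         result.append(cur)
--     return result
-- ===== Notes on version B (the rewrite author's own statement) =====
-- stated objective: faster
-- what changed: Replaced the while-loop that rescans the list with l.index at every chunk boundary by a single left-to-right pass that closes the current chunk whenever the element equals the chunk's first element.
import Mathlib
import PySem

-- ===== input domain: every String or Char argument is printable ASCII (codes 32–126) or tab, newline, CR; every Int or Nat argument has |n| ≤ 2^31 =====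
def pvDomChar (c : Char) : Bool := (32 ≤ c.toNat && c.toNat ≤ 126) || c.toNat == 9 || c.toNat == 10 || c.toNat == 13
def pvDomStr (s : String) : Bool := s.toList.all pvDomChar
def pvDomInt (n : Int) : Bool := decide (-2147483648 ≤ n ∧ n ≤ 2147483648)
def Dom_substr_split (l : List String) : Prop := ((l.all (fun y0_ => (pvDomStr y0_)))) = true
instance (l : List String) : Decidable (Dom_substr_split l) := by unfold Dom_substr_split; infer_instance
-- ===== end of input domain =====

-- B replaces A's repeated l.index scans by one left-to-right pass that closes a chunk
-- when the element equals the chunk's first element (objective: faster).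


-- ===== PORT A =====
-- l.index(l[start], start+1) → search in l[start+1:], adding the offset back (exact: Python
-- returns the absolute index of the first match at position ≥ start+1, else raises ValueError,
-- which A turns into 0).  A only calls it with 0 ≤ start < len(l), so l[start] is ported with
-- pyGetD (the default is never read).
def index_second_str (l : List String) (start : Nat) : Nat :=
  match PySem.List.index? (l.drop (start + 1)) (PySem.List.pyGetD l start "") with
  | some k => start + 1 + k
  | none => 0

theorem index_second_str_gt (l : List String) (start : Nat)
    (h : index_second_str l start ≠ 0) : start < index_second_str l start := by
  revert h
  unfold index_second_str
  cases PySem.List.index? (l.drop (start + 1)) (PySem.List.pyGetD l start "") with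
  | none => simp
  | some k => intro _; show start < start + 1 + k; omega

-- A's while loop, one constructor per appended sublist; start strictly increases.
def substrAux (l : List String) (start : Nat) : List (List String) :=
  if _h : start < l.length then
    if hi : index_second_str l start ≠ 0 then
      PySem.List.slice l (some (start : Int)) (some ((index_second_str l start : Nat) : Int))
        :: substrAux l (index_second_str l start)
    else
      PySem.List.slice l (some (start : Int)) none :: substrAux l l.length
  else []
  termination_by l.length - start
  decreasing_by
  · have := index_second_str_gt l start hi; omega
  · omega

def substr_split (l : List String) : List (List String) := substrAux l 0

-- ===== PORT B =====
-- One pass: state (result, cur); flush cur when x equals cur's first element.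
def altStep (st : List (List String) × List String) (x : String) :
    List (List String) × List String :=
  match st with
  | (res, []) => (res, [x])
  | (res, m :: t) => if x = m then (res ++ [m :: t], [x]) else (res, (m :: t) ++ [x])

def substr_split_alt (l : List String) : List (List String) :=
  let st := l.foldl altStep ([], [])
  if st.2 = [] then st.1 else st.1 ++ [st.2]

-- ===== PRECONDITION & SPEC =====
def Spec_substr_split (l : List String) (out : List (List String)) : Prop := out = substr_split_alt l
instance (l : List String) (out : List (List String)) : Decidable (Spec_substr_split l out) := by unfold Spec_substr_split; infer_instance

-- ===== CLAIM (what is proved, stated in full; the proofs are below) =====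
def Claim_equal_substr_split : Prop := ∀ (l : List String), Dom_substr_split l → Spec_substr_split l (substr_split l)

-- ===== LEMMAS AND PROOFS =====

-- Common specification: chunks delimited by the next occurrence of the chunk's head.
def specSplit : List String → List (List String)
  | [] => []
  | x :: xs => (x :: xs.takeWhile (· ≠ x)) :: specSplit (xs.dropWhile (· ≠ x))
  termination_by l => l.length
  decreasing_by
    simp only [List.length_cons]
    exact Nat.lt_succ_of_le (List.length_dropWhile_le _ _)

theorem index?_take_drop {v : String} : ∀ (ys : List String) (k : Nat),
    PySem.List.index? ys v = some k →
    ys.takeWhile (· ≠ v) = ys.take k ∧ ys.dropWhile (· ≠ v) = ys.drop k := by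
  intro ys
  induction ys with
  | nil => intro k h; simp [PySem.List.index?] at h
  | cons y t ih =>
    intro k h
    by_cases hy : y = v
    · subst hy
      rw [PySem.List.index?_cons_self] at h
      simp at h
      subst h
      simp [List.takeWhile_cons, List.dropWhile_cons]
    · rw [PySem.List.index?_cons_of_ne t hy] at h
      cases hk : PySem.List.index? t v with
      | none => rw [hk] at h; simp at h
      | some k' =>
        rw [hk] at h; simp at h
        obtain ⟨h1, h2⟩ := ih k' hk
        subst h
        refine ⟨?_, ?_⟩
        · rw [List.takeWhile_cons_of_pos (by simpa using hy), h1, List.take_succ_cons]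
        · rw [List.dropWhile_cons_of_pos (by simpa using hy), h2, List.drop_succ_cons]

theorem index?_none_eq {v : String} : ∀ (ys : List String),
    PySem.List.index? ys v = none →
    ys.takeWhile (· ≠ v) = ys ∧ ys.dropWhile (· ≠ v) = [] := by
  intro ys
  induction ys with
  | nil => intro _; simp
  | cons y t ih =>
    intro h
    by_cases hy : y = v
    · subst hy; rw [PySem.List.index?_cons_self] at h; simp at h
    · rw [PySem.List.index?_cons_of_ne t hy] at h
      simp only [Option.map_eq_none_iff] at h
      obtain ⟨h1, h2⟩ := ih h
      refine ⟨?_, ?_⟩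
      · rw [List.takeWhile_cons_of_pos (by simpa using hy), h1]
      · rw [List.dropWhile_cons_of_pos (by simpa using hy), h2]

theorem substrAux_eq_spec (l : List String) : ∀ (start : Nat), start ≤ l.length →
    substrAux l start = specSplit (l.drop start) := by
  intro start
  induction hn : l.length - start using Nat.strong_induction_on generalizing start with
  | _ n ih =>
    intro hle
    by_cases h : start < l.length
    · have hget : l.drop start = l[start] :: l.drop (start + 1) :=
        List.drop_eq_getElem_cons h
      have hgetD : PySem.List.pyGetD l start "" = l[start] := by
        simp [PySem.List.pyGetD_natCast, List.getD_eq_getElem?_getD, List.getElem?_eq_getElem h]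
      rw [substrAux, dif_pos h]
      cases hk : PySem.List.index? (l.drop (start + 1)) l[start] with
      | none =>
        have hidx : index_second_str l start = 0 := by
          unfold index_second_str; rw [hgetD, hk]
        obtain ⟨ht, hd⟩ := index?_none_eq (v := l[start]) (l.drop (start + 1)) hk
        rw [hidx, dif_neg (by simp)]
        have hrec : substrAux l l.length = [] := by rw [substrAux]; simp
        rw [hrec, PySem.List.slice_from_natCast, hget, specSplit, ht, hd]
        simp [specSplit]
      | some k =>
        have hidx : index_second_str l start = start + 1 + k := by
          unfold index_second_str; rw [hgetD, hk]
        obtain ⟨ht, hd⟩ := index?_take_drop (v := l[start]) (l.drop (start + 1)) k hk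
        obtain ⟨hklt, -, -⟩ := PySem.List.getElem_of_index?_eq_some hk
        have hlen : start + 1 + k ≤ l.length := by
          simp [List.length_drop] at hklt; omega
        rw [hidx, dif_pos (by omega : start + 1 + k ≠ 0)]
        have hslice : PySem.List.slice l (some (start : Int)) (some ((start + 1 + k : Nat) : Int))
            = l[start] :: (l.drop (start + 1)).take k := by
          rw [PySem.List.slice_natCast]
          have hsub : start + 1 + k - start = k + 1 := by omega
          rw [hsub, hget, List.take_succ_cons]
        have hrec : substrAux l (start + 1 + k) = specSplit (l.drop (start + 1 + k)) :=
          ih (l.length - (start + 1 + k)) (by omega) (start + 1 + k) rfl hlen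
        have hdd : (l.drop (start + 1)).drop k = l.drop (start + 1 + k) := by
          rw [List.drop_drop]
        rw [hslice, hrec, hget, specSplit, ht, hd, hdd]
    · have hs : start = l.length := by omega
      have hdrop : l.drop start = [] := by simp [hs]
      rw [substrAux]
      simp [h, hdrop, specSplit]

def finalize (st : List (List String) × List String) : List (List String) :=
  if st.2 = [] then st.1 else st.1 ++ [st.2]

theorem alt_inv : ∀ (ys : List String) (m : String) (t : List String)
    (res : List (List String)),
    finalize (ys.foldl altStep (res, m :: t)) =
      res ++ ((m :: (t ++ ys.takeWhile (· ≠ m))) :: specSplit (ys.dropWhile (· ≠ m))) := by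
  intro ys
  induction ys with
  | nil => intro m t res; simp [finalize, specSplit]
  | cons y ys ih =>
    intro m t res
    by_cases hy : y = m
    · subst hy
      simp only [List.foldl_cons, altStep, if_pos]
      rw [ih y [] (res ++ [y :: t])]
      simp only [List.takeWhile_cons, List.dropWhile_cons, decide_eq_true_eq, ne_eq,
        not_true_eq_false, decide_false, Bool.false_eq_true, if_false]
      rw [specSplit]
      simp
    · simp only [List.foldl_cons, altStep, if_neg hy, List.cons_append]
      rw [ih m (t ++ [y]) res]
      simp [List.takeWhile_cons, List.dropWhile_cons, hy]

theorem alt_eq_spec (l : List String) : substr_split_alt l = specSplit l := by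
  cases l with
  | nil => simp [substr_split_alt, specSplit]
  | cons x xs =>
    show finalize ((x :: xs).foldl altStep ([], [])) = specSplit (x :: xs)
    have h0 : (x :: xs).foldl altStep ([], []) = xs.foldl altStep ([], [x]) := rfl
    rw [h0, alt_inv xs x [] [], specSplit]
    simp

-- ===== VERDICT (by name: the statement is the Claim_ definition above) =====
theorem substr_split_spec : Claim_equal_substr_split := by
  intro l _
  show substr_split l = substr_split_alt l
  rw [alt_eq_spec]
  unfold substr_split
  rw [substrAux_eq_spec l 0 (Nat.zero_le _), List.drop_zero]
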